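-- pv_equiv track=rewrite | github.com/KlasafGeijerstam/Kattis | python3/sumsquareddigits.py | ssn
-- ===== SOURCE A (Python) =====
-- def ssn(b,n):
--     lst = []
--     while n > 0:
--         x = 0
--         while True:
--             x += 1
--             if n - b**x < 0:
--                 x -= 1
--                 break
--
--         k = 1
--         while True:
--             k += 1
--             if n - k * b**x < 0:
--                 k -= 1
--                 break
--         lst.append(k*k)
--         n -= k*b**x
--     return sum(lst)
-- ===== SOURCE B (Python) =====
-- def ssn(b, n):
--     total = 0
--     while n > 0:
--         d = n % b
--         total += d * d
--         n //= b
--     return total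
-- ===== Notes on version B (the rewrite author's own statement) =====
-- stated objective: faster
-- what changed: B extracts digits low-to-high with one modulo/division per digit instead of A's linear upward searches for the exponent x and the leading digit k (each recomputing b**x) per outer step.
import Mathlib
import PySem

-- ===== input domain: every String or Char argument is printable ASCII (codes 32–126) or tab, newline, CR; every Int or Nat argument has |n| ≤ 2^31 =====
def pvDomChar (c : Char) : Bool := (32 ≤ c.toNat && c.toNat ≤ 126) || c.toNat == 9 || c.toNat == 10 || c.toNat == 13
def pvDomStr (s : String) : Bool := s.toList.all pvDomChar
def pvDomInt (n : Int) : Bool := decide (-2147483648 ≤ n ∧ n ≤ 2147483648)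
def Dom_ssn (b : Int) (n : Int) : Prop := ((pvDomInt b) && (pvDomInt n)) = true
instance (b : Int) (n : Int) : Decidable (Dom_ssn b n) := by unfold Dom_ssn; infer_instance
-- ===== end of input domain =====

-- B replaces A's per-digit upward searches for the exponent and leading digit (each step
-- recomputing b**x) by a single low-to-high modulo/division digit loop; measurably faster.

-- ===== PORT A =====
-- inner 'while True' search for x: x += 1; if n - b**x < 0: x -= 1; break
-- (fuel-based port of the unbounded while; fuel n.toNat suffices on Pre_, see findX spec below)
def ssnFindX (b n : Int) (x : Nat) (fuel : Nat) : Nat :=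
  match fuel with
  | 0 => x
  | f+1 => if n - b ^ (x+1) < 0 then x else ssnFindX b n (x+1) f

-- inner 'while True' search for k: k += 1; if n - k*b**x < 0: k -= 1; break
def ssnFindK (b n : Int) (x : Nat) (k : Int) (fuel : Nat) : Int :=
  match fuel with
  | 0 => k
  | f+1 => if n - (k+1) * b ^ x < 0 then k else ssnFindK b n x (k+1) f

-- outer 'while n > 0' loop, building lst (fuel n.toNat suffices on Pre_: n strictly decreases)
def ssnLoop (b : Int) (fuel : Nat) (n : Int) (lst : List Int) : List Int :=
  match fuel with
  | 0 => lst
  | f+1 =>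
    if n > 0 then
      let x := ssnFindX b n 0 n.toNat
      let k := ssnFindK b n x 1 n.toNat
      ssnLoop b f (n - k * b ^ x) (lst ++ [k * k])
    else lst

def ssn (b : Int) (n : Int) : Int := (ssnLoop b n.toNat n []).sum

-- ===== PORT B =====
-- while n > 0: d = n % b; total += d*d; n //= b   (fuel n.toNat suffices on Pre_)
def ssnAltGo (b : Int) (fuel : Nat) (n : Int) (total : Int) : Int :=
  match fuel with
  | 0 => total
  | f+1 =>
    if n > 0 then
      ssnAltGo b f (PySem.Int.floordiv n b) (total + (PySem.Int.mod n b) * (PySem.Int.mod n b))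
    else total

def ssn_alt (b : Int) (n : Int) : Int := ssnAltGo b n.toNat n 0

-- ===== PRECONDITION & SPEC =====
-- Pre_ excludes only inputs on which A never returns: for b ≤ 1 with n > 0 both inner
-- searches diverge (b**x never exceeds n); for n ≤ 0 A returns 0 for any b.
def Pre_ssn (b : Int) (n : Int) : Prop := 2 ≤ b ∨ n ≤ 0
instance (b : Int) (n : Int) : Decidable (Pre_ssn b n) := by unfold Pre_ssn; infer_instance
def pvWitness_ssn : Int × Int := (10, 12345)

def Spec_ssn (b : Int) (n : Int) (out : Int) : Prop := out = ssn_alt b n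
instance (b : Int) (n : Int) (out : Int) : Decidable (Spec_ssn b n out) := by unfold Spec_ssn; infer_instance

-- ===== CLAIM (what is proved, stated in full; the proofs are below) =====
def Claim_equal_ssn : Prop := ∀ (b : Int) (n : Int), Dom_ssn b n → Pre_ssn b n → Spec_ssn b n (ssn b n)

-- ===== LEMMAS AND PROOFS =====

lemma findX_spec (b n : Int) : ∀ (fuel x : Nat), b ^ x ≤ n → n < b ^ (x + fuel + 1) →
    b ^ (ssnFindX b n x fuel) ≤ n ∧ n < b ^ (ssnFindX b n x fuel + 1) := by
  intro fuel
  induction fuel with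
  | zero => intro x h1 h2; simpa [ssnFindX] using ⟨h1, by simpa using h2⟩
  | succ f ih =>
    intro x h1 h2
    simp only [ssnFindX]
    split
    · constructor
      · exact h1
      · omega
    · rename_i hcond
      have h1' : b ^ (x+1) ≤ n := by omega
      have h2' : n < b ^ ((x+1) + f + 1) := by
        have : (x+1) + f + 1 = x + (f+1) + 1 := by omega
        rw [this]; exact h2
      exact ih (x+1) h1' h2'

lemma findK_spec (b n : Int) (x : Nat) : ∀ (fuel : Nat) (k : Int),
    k * b ^ x ≤ n → n < (k + (fuel : Int) + 1) * b ^ x →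
    (ssnFindK b n x k fuel) * b ^ x ≤ n ∧ n < (ssnFindK b n x k fuel + 1) * b ^ x := by
  intro fuel
  induction fuel with
  | zero =>
    intro k h1 h2
    simp only [ssnFindK]
    push_cast at h2
    exact ⟨h1, by linarith⟩
  | succ f ih =>
    intro k h1 h2
    simp only [ssnFindK]
    split
    · rename_i hcond
      exact ⟨h1, by linarith⟩
    · rename_i hcond
      have h1' : (k+1) * b ^ x ≤ n := by omega
      have h2' : n < ((k+1) + (f : Int) + 1) * b ^ x := by
        have : ((k+1) + (f : Int) + 1) = (k + ((f : Nat)+1 : Nat) + 1) := by push_cast; ring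
        rw [this]; exact h2
      exact ih (k+1) h1' h2'

-- the one-step data of A's outer loop, for 2 ≤ b and 1 ≤ n
lemma step_spec (b n : Int) (hb : 2 ≤ b) (hn : 1 ≤ n) :
    let x := ssnFindX b n 0 n.toNat
    let k := ssnFindK b n x 1 n.toNat
    b ^ x ≤ n ∧ n < b ^ (x+1) ∧ k = n / b ^ x ∧ n - k * b ^ x = n % b ^ x := by
  intro x k
  have hb0 : (0:Int) < b := by omega
  have hbx : ∀ m : Nat, (0:Int) < b ^ m := fun m => pow_pos hb0 m
  have hX : b ^ x ≤ n ∧ n < b ^ (x + 1) := by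
    apply findX_spec b n n.toNat 0
    · simpa using hn
    · calc n ≤ (n.toNat : Int) := by omega
        _ < 2 ^ n.toNat := by exact_mod_cast Nat.lt_two_pow_self
        _ ≤ 2 ^ (0 + n.toNat + 1) := by
            apply pow_le_pow_right₀ (by norm_num); omega
        _ ≤ b ^ (0 + n.toNat + 1) := pow_le_pow_left₀ (by norm_num) hb _
  have hK : k * b ^ x ≤ n ∧ n < (k + 1) * b ^ x := by
    apply findK_spec b n x n.toNat 1
    · simpa using hX.1
    · have h1 : n + 2 ≤ (1 + (n.toNat : Int) + 1) := by omega
      have h2 : (1 + (n.toNat : Int) + 1) ≤ (1 + (n.toNat : Int) + 1) * b ^ x :=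
        le_mul_of_one_le_right (by omega) (hbx x)
      omega
  have hc := hbx x
  have hdiv : n / b ^ x = k := by
    have hd := Int.ediv_add_emod n (b ^ x)
    have hr0 := Int.emod_nonneg n (ne_of_gt hc)
    have hr1 := Int.emod_lt_of_pos n hc
    by_contra hne
    rcases lt_or_gt_of_ne hne with h | h
    · have : n / b ^ x + 1 ≤ k := by omega
      nlinarith [hK.1]
    · have : k + 1 ≤ n / b ^ x := by omega
      nlinarith [hK.2]
  refine ⟨hX.1, hX.2, hdiv.symm, ?_⟩
  rw [Int.emod_def, ← hdiv]; ring

lemma loop_append (b : Int) : ∀ (f : Nat) (n : Int) (lst : List Int),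
    ssnLoop b f n lst = lst ++ ssnLoop b f n [] := by
  intro f
  induction f with
  | zero => intro n lst; simp [ssnLoop]
  | succ f ih =>
    intro n lst
    simp only [ssnLoop]
    split
    · rw [ih _ (lst ++ _), ih _ ([] ++ _)]; simp
    · simp

lemma loop_fuel_succ (b : Int) (hb : 2 ≤ b) : ∀ (f : Nat) (n : Int) (lst : List Int),
    n.toNat ≤ f → ssnLoop b (f+1) n lst = ssnLoop b f n lst := by
  intro f
  induction f with
  | zero =>
    intro n lst h
    have : ¬ n > 0 := by omega
    simp [ssnLoop, this]
  | succ f ih =>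
    intro n lst h
    by_cases hn : n > 0
    · have hs := step_spec b n hb (by omega)
      simp only at hs
      obtain ⟨h1, h2, hk, hsub⟩ := hs
      have hc : (0:Int) < b ^ (ssnFindX b n 0 n.toNat) := pow_pos (by omega) _
      have hr0 := Int.emod_nonneg n (ne_of_gt hc)
      have hr1 := Int.emod_lt_of_pos n hc
      conv_lhs => rw [ssnLoop]
      conv_rhs => rw [ssnLoop]
      simp only [if_pos hn]
      apply ih
      omega
    · conv_lhs => rw [ssnLoop]
      conv_rhs => rw [ssnLoop]
      simp [hn]
lemma loop_fuel_ge (b : Int) (hb : 2 ≤ b) (n : Int) (lst : List Int) :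
    ∀ (f : Nat), n.toNat ≤ f → ssnLoop b f n lst = ssnLoop b n.toNat n lst := by
  intro f
  induction f with
  | zero =>
    intro h
    have h0 : n.toNat = 0 := by omega
    rw [h0]
  | succ f ih =>
    intro h
    rcases Nat.lt_or_ge n.toNat (f+1) with h' | h'
    · rw [loop_fuel_succ b hb f n lst (by omega)]; exact ih (by omega)
    · have : n.toNat = f + 1 := by omega
      rw [this]

-- A's recurrence: one outer iteration strips the leading base-b digit
lemma a_rec (b n : Int) (hb : 2 ≤ b) (hn : 1 ≤ n) :
    ∃ X : Nat, b ^ X ≤ n ∧ n < b ^ (X+1) ∧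
      ssn b n = (n / b ^ X) * (n / b ^ X) + ssn b (n % b ^ X) := by
  have hs := step_spec b n hb hn
  simp only at hs
  obtain ⟨h1, h2, hk, hsub⟩ := hs
  set X := ssnFindX b n 0 n.toNat with hX
  set k := ssnFindK b n X 1 n.toNat with hKdef
  refine ⟨X, h1, h2, ?_⟩
  have hc : (0:Int) < b ^ X := pow_pos (by omega) _
  have hr0 := Int.emod_nonneg n (ne_of_gt hc)
  have hr1 := Int.emod_lt_of_pos n hc
  obtain ⟨m, hm⟩ : ∃ m, n.toNat = m + 1 := ⟨n.toNat - 1, by omega⟩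
  unfold ssn
  rw [hm]
  conv_lhs => rw [ssnLoop]
  simp only [if_pos (by omega : n > 0), ← hX, ← hKdef]
  rw [loop_append, loop_fuel_ge b hb _ _ m (by omega), hsub]
  simp [hk]

lemma altGo_acc (b : Int) : ∀ (f : Nat) (n t : Int),
    ssnAltGo b f n t = t + ssnAltGo b f n 0 := by
  intro f
  induction f with
  | zero => intro n t; simp [ssnAltGo]
  | succ f ih =>
    intro n t
    simp only [ssnAltGo]
    split
    · rw [ih _ (t + _), ih _ (0 + _)]; ring
    · simp

lemma altGo_fuel_succ (b : Int) (hb : 2 ≤ b) : ∀ (f : Nat) (n t : Int),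
    n.toNat ≤ f → ssnAltGo b (f+1) n t = ssnAltGo b f n t := by
  intro f
  induction f with
  | zero =>
    intro n t h
    have : ¬ n > 0 := by omega
    simp [ssnAltGo, this]
  | succ f ih =>
    intro n t h
    by_cases hn : n > 0
    · conv_lhs => rw [ssnAltGo]
      conv_rhs => rw [ssnAltGo]
      simp only [if_pos hn]
      apply ih
      rw [PySem.Int.floordiv_eq_ediv_of_pos (by omega)]
      have h1 : n / b < n := by
        rw [Int.ediv_lt_iff_lt_mul (by omega : (0:Int) < b)]; nlinarith
      have h2 : 0 ≤ n / b := Int.ediv_nonneg (by omega) (by omega)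
      omega
    · conv_lhs => rw [ssnAltGo]
      conv_rhs => rw [ssnAltGo]
      simp [hn]

lemma altGo_fuel_ge (b : Int) (hb : 2 ≤ b) (n t : Int) :
    ∀ (f : Nat), n.toNat ≤ f → ssnAltGo b f n t = ssnAltGo b n.toNat n t := by
  intro f
  induction f with
  | zero => intro h; have : n.toNat = 0 := by omega
            rw [this]
  | succ f ih =>
    intro h
    rcases Nat.lt_or_ge n.toNat (f+1) with h' | h'
    · rw [altGo_fuel_succ b hb f n t (by omega)]; exact ih (by omega)
    · have : n.toNat = f + 1 := by omega
      rw [this]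

-- B's recurrence
lemma alt_rec (b n : Int) (hb : 2 ≤ b) (hn : 1 ≤ n) :
    ssn_alt b n = (n % b) * (n % b) + ssn_alt b (n / b) := by
  obtain ⟨m, hm⟩ : ∃ m, n.toNat = m + 1 := ⟨n.toNat - 1, by omega⟩
  unfold ssn_alt
  rw [hm]
  conv_lhs => rw [ssnAltGo]
  simp only [if_pos (by omega : n > 0)]
  rw [altGo_acc, PySem.Int.floordiv_eq_ediv_of_pos (by omega),
      PySem.Int.mod_eq_emod_of_pos (by omega)]
  have h1 : n / b < n := by
    rw [Int.ediv_lt_iff_lt_mul (by omega : (0:Int) < b)]; nlinarith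
  have h2 : 0 ≤ n / b := Int.ediv_nonneg (by omega) (by omega)
  rw [altGo_fuel_ge b hb _ _ m (by omega)]
  ring

lemma alt_nonpos (b n : Int) (hn : n ≤ 0) : ssn_alt b n = 0 := by
  unfold ssn_alt
  have : n.toNat = 0 := by omega
  rw [this]; rfl

-- B's value splits at any power of b: leading part / trailing part
lemma alt_split (b : Int) (hb : 2 ≤ b) : ∀ (X : Nat) (n : Int), 0 ≤ n → n < b ^ (X+1) →
    ssn_alt b n = (n / b ^ X) * (n / b ^ X) + ssn_alt b (n % b ^ X) := by
  have hb0 : (0:Int) < b := by omega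
  intro X
  induction X with
  | zero =>
    intro n h0 h1
    simp only [zero_add, pow_zero, pow_one] at h1 ⊢
    rcases eq_or_lt_of_le h0 with h | h
    · simp [← h, alt_nonpos]
    · rw [alt_rec b n hb (by omega)]
      rw [Int.emod_eq_of_lt h0 h1, Int.ediv_eq_zero_of_lt h0 h1]
      simp [alt_nonpos b 0 le_rfl]
  | succ X ih =>
    intro n h0 h1
    rcases eq_or_lt_of_le h0 with h | h
    · simp [← h, alt_nonpos b 0 le_rfl]
    · have hc : (0:Int) < b ^ X := pow_pos hb0 X
      have hc1 : (0:Int) < b ^ (X+1) := pow_pos hb0 (X+1)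
      rw [alt_rec b n hb (by omega)]
      have hdb0 : 0 ≤ n / b := Int.ediv_nonneg (by omega) (by omega)
      have hdb1 : n / b < b ^ (X+1) := by
        rw [Int.ediv_lt_iff_lt_mul hb0]
        calc n < b ^ (X+1+1) := h1
          _ = b ^ (X+1) * b := by ring
      rw [ih (n / b) hdb0 hdb1]
      -- identities relating the pieces
      have e1 : n / b / b ^ X = n / b ^ (X+1) := by
        rw [Int.ediv_ediv_of_nonneg (by omega : (0:Int) ≤ b)]
        congr 1; ring
      set r := n % b ^ (X+1) with hr
      have hdvd : (b : Int) ∣ b ^ (X+1) := dvd_pow_self b (by omega)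
      have e2 : r % b = n % b := Int.emod_emod_of_dvd n hdvd
      have hq := Int.ediv_add_emod n (b ^ (X+1))
      have hr0 : 0 ≤ r := Int.emod_nonneg n (ne_of_gt hc1)
      have hr1 : r < b ^ (X+1) := Int.emod_lt_of_pos n hc1
      have e3 : n / b % b ^ X = r / b := by
        set q := n / b ^ (X+1) with hqdef
        have hn_eq : n = r + b * (b ^ X * q) := by
          rw [hr]; linear_combination -hq
        have hnb : n / b = r / b + b ^ X * q := by
          conv_lhs => rw [hn_eq]
          rw [Int.add_mul_ediv_left r _ (by omega : (b:Int) ≠ 0)]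
        rw [hnb, Int.add_mul_emod_self_left]
        apply Int.emod_eq_of_lt
        · exact Int.ediv_nonneg hr0 (by omega)
        · rw [Int.ediv_lt_iff_lt_mul hb0]
          calc r < b ^ (X+1) := hr1
            _ = b ^ X * b := by ring
      rcases eq_or_lt_of_le hr0 with hz | hz
      · have hnb0 : n % b = 0 := by rw [← e2, ← hz]; simp
        have hrd : r / b = 0 := by rw [← hz]; simp
        rw [hnb0, e1, e3, hrd, ← hz]
        simp [alt_nonpos b 0 le_rfl]
      · rw [alt_rec b r hb (by omega), e2, e1, e3]
        ring

lemma a_nonpos (b n : Int) (hn : n ≤ 0) : ssn b n = 0 := by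
  unfold ssn
  have : n.toNat = 0 := by omega
  rw [this]; rfl

lemma main_aux (b : Int) (hb : 2 ≤ b) : ∀ (m : Nat) (n : Int), n.toNat ≤ m →
    ssn b n = ssn_alt b n := by
  intro m
  induction m with
  | zero =>
    intro n h
    have hn : n ≤ 0 := by omega
    rw [a_nonpos b n hn, alt_nonpos b n hn]
  | succ m ih =>
    intro n h
    by_cases hn : 1 ≤ n
    · obtain ⟨X, h1, h2, hrec⟩ := a_rec b n hb hn
      have hc : (0:Int) < b ^ X := pow_pos (by omega) X
      have hr0 := Int.emod_nonneg n (ne_of_gt hc)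
      have hr1 := Int.emod_lt_of_pos n hc
      rw [hrec, ih (n % b ^ X) (by omega)]
      rw [alt_split b hb X n (by omega) h2]
    · have hn' : n ≤ 0 := by omega
      rw [a_nonpos b n hn', alt_nonpos b n hn']

-- ===== VERDICT (by name: the statement is the Claim_ definition above) =====
theorem ssn_spec : Claim_equal_ssn := by
  intro b n _ hpre
  unfold Spec_ssn
  rcases hpre with hb | hn
  · exact main_aux b hb n.toNat n le_rfl
  · rw [a_nonpos b n hn, alt_nonpos b n hn]
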